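-- pv_equiv track=rewrite | github.com/q847633684/RmworldEN_by_day | day_translation/extract/generators.py | _group_defs_by_type
-- ===== SOURCE A (Python) =====
-- from typing import List, Tuple, Dict
--
-- TranslationData = Tuple[str, str, str, str]
--
-- def _group_defs_by_type(defs_translations: List[TranslationData]) -> Dict[str, Dict[str, str]]:
--     def_groups = {}
--     for full_path, text, tag, file_path in defs_translations:
--         if '/' in full_path:
--             def_type_part, field_part = full_path.split('/', 1)
--             def_type = def_type_part
--             if def_type not in def_groups:
--                 def_groups[def_type] = {}
--             def_groups[def_type][field_part] = text
--     return def_groups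
-- ===== SOURCE B (Python) =====
-- def _group_defs_by_type(defs_translations):
--     # pass 1: parse into flat (def_type, field_part, text) records
--     items = []
--     for full_path, text, tag, file_path in defs_translations:
--         if '/' in full_path:
--             def_type, field_part = full_path.split('/', 1)
--             items.append((def_type, field_part, text))
--     # pass 2: outer keys in first-appearance order, inner dict per key by comprehension
--     order = list(dict.fromkeys(dt for dt, _f, _t in items))
--     return {dt: {f: t for d, f, t in items if d == dt} for dt in order}
-- ===== Notes on version B (the rewrite author's own statement) =====
-- stated objective: alternative
-- what changed: Replaces A's single-pass incremental nested-dict mutation with a parse pass into flat (type, field, text) records, an ordered key dedup, and a per-key grouping comprehension that rebuilds each inner dict.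
import Mathlib
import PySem

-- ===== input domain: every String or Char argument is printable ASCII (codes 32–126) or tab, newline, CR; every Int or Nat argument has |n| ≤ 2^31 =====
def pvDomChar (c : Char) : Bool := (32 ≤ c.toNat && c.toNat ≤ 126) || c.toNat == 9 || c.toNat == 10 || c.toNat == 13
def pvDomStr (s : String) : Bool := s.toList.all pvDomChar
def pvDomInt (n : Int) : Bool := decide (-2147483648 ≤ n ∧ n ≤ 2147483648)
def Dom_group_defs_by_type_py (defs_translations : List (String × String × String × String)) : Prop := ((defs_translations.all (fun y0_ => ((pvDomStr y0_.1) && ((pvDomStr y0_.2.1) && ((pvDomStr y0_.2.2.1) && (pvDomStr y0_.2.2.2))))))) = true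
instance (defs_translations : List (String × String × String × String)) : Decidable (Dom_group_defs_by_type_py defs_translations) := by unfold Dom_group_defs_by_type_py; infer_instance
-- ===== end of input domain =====

-- B replaces A's incremental nested-dict building by a parse pass, an ordered dedup of the
-- def types, and a per-type grouping pass; same return value, stated objective: alternative.

-- ===== PORT A =====
def group_defs_by_type_py (defs_translations : List (String × String × String × String)) : List (String × List (String × String)) :=
  let def_groups : PySem.Dict String (PySem.Dict String String) :=
    defs_translations.foldl (fun d p =>
      if PySem.Str.isIn "/" p.1 then
        match PySem.Str.splitMax? p.1 "/" 1 with
        | some (def_type :: field_part :: _) =>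
          let d' := if d.contains def_type then d else d.insert def_type PySem.Dict.empty
          d'.insert def_type ((d'.getD def_type PySem.Dict.empty).insert field_part p.2.1)
        | _ => d
      else d) PySem.Dict.empty
  def_groups.items.map (fun q => (q.1, q.2.items))

-- ===== PORT B =====
def group_defs_by_type_py_alt (defs_translations : List (String × String × String × String)) : List (String × List (String × String)) :=
  let items : List (String × String × String) :=
    defs_translations.foldl (fun acc p =>
      if PySem.Str.isIn "/" p.1 then
        -- '/' in full_path guarantees the split has two parts; the other cases return acc unchanged
        match PySem.Str.splitMax? p.1 "/" 1 with
        | some (def_type :: field_part :: _) => acc ++ [(def_type, field_part, p.2.1)]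
        | some [_] => acc
        | some [] => acc
        | none => acc
      else acc) []
  let order := PySem.List.dedup (items.map (·.1))
  order.map (fun dt =>
    (dt, ((items.filter (fun it => it.1 == dt)).foldl
            (fun (d : PySem.Dict String String) it => d.insert it.2.1 it.2.2)
            PySem.Dict.empty).items))

-- ===== PRECONDITION & SPEC =====
def Spec_group_defs_by_type_py (defs_translations : List (String × String × String × String)) (out : List (String × List (String × String))) : Prop := out = group_defs_by_type_py_alt defs_translations
instance (defs_translations : List (String × String × String × String)) (out : List (String × List (String × String))) : Decidable (Spec_group_defs_by_type_py defs_translations out) := by unfold Spec_group_defs_by_type_py; infer_instance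

-- ===== CLAIM (what is proved, stated in full; the proofs are below) =====
def Claim_equal_group_defs_by_type_py : Prop := ∀ (defs_translations : List (String × String × String × String)), Dom_group_defs_by_type_py defs_translations → Spec_group_defs_by_type_py defs_translations (group_defs_by_type_py defs_translations)

-- ===== LEMMAS AND PROOFS =====

-- shared parse of one record, used by the proofs only
def pvParse1 (p : String × String × String × String) : Option (String × String × String) :=
  if PySem.Str.isIn "/" p.1 then
    match PySem.Str.splitMax? p.1 "/" 1 with
    | some (def_type :: field_part :: _) => some (def_type, field_part, p.2.1)
    | _ => none
  else none

-- the canonical one-record step A performs on the nested dict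
def pvStep (d : PySem.Dict String (PySem.Dict String String)) (it : String × String × String) : PySem.Dict String (PySem.Dict String String) :=
  d.insert it.1 ((d.getD it.1 PySem.Dict.empty).insert it.2.1 it.2.2)

-- A's literal loop body and B's literal loop body, named for the proofs
def pvStepAraw (d : PySem.Dict String (PySem.Dict String String)) (p : String × String × String × String) : PySem.Dict String (PySem.Dict String String) :=
  if PySem.Str.isIn "/" p.1 then
    match PySem.Str.splitMax? p.1 "/" 1 with
    | some (def_type :: field_part :: _) =>
      let d' := if d.contains def_type then d else d.insert def_type PySem.Dict.empty
      d'.insert def_type ((d'.getD def_type PySem.Dict.empty).insert field_part p.2.1)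
    | _ => d
  else d

def pvStepBraw (acc : List (String × String × String)) (p : String × String × String × String) : List (String × String × String) :=
  if PySem.Str.isIn "/" p.1 then
    match PySem.Str.splitMax? p.1 "/" 1 with
    | some (def_type :: field_part :: _) => acc ++ [(def_type, field_part, p.2.1)]
    | some [_] => acc
    | some [] => acc
    | none => acc
  else acc

lemma pvStepAraw_eq (d : PySem.Dict String (PySem.Dict String String)) (p : String × String × String × String) :
    pvStepAraw d p = match pvParse1 p with | some it => pvStep d it | none => d := by
  unfold pvStepAraw pvParse1
  by_cases h : PySem.Str.isIn "/" p.1 = true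
  · simp only [h, if_true]
    cases hs : PySem.Str.splitMax? p.1 "/" 1 with
    | none => rfl
    | some l =>
      match l with
      | [] => rfl
      | [a] => rfl
      | a :: b :: rest =>
        simp only []
        by_cases hc : d.contains a = true
        · simp [hc, pvStep]
        · simp only [Bool.not_eq_true] at hc
          simp [hc, pvStep, PySem.Dict.getD_insert_self, PySem.Dict.insert_insert_self,
            PySem.Dict.getD_of_not_contains d _ hc]
  · simp only [Bool.not_eq_true, PySem.Str.isIn_eq] at h
    simp [show PySem.Chars.isIn ['/'] p.1.toList = false from h]

lemma pvStepBraw_eq (acc : List (String × String × String)) (p : String × String × String × String) :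
    pvStepBraw acc p = match pvParse1 p with | some it => acc ++ [it] | none => acc := by
  unfold pvStepBraw pvParse1
  by_cases h : PySem.Str.isIn "/" p.1 = true
  · simp only [h, if_true]
    cases hs : PySem.Str.splitMax? p.1 "/" 1 with
    | none => rfl
    | some l => match l with | [] => rfl | [a] => rfl | a :: b :: rest => rfl
  · simp only [Bool.not_eq_true, PySem.Str.isIn_eq] at h
    simp [show PySem.Chars.isIn ['/'] p.1.toList = false from h]

lemma pvFoldA_eq (xs : List (String × String × String × String))
    (d : PySem.Dict String (PySem.Dict String String)) :
    xs.foldl pvStepAraw d = (xs.filterMap pvParse1).foldl pvStep d := by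
  induction xs generalizing d with
  | nil => rfl
  | cons p xs ih =>
    rw [List.foldl_cons, List.filterMap_cons, pvStepAraw_eq]
    cases pvParse1 p with
    | none => exact ih d
    | some it => rw [List.foldl_cons]; exact ih (pvStep d it)

lemma pvFoldB_eq (xs : List (String × String × String × String))
    (acc : List (String × String × String)) :
    xs.foldl pvStepBraw acc = acc ++ xs.filterMap pvParse1 := by
  induction xs generalizing acc with
  | nil => simp
  | cons p xs ih =>
    rw [List.foldl_cons, List.filterMap_cons, pvStepBraw_eq]
    cases pvParse1 p with
    | none => exact ih acc
    | some it => rw [ih]; simp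

lemma pvKeys (l : List (String × String × String)) :
    (l.foldl pvStep PySem.Dict.empty).keys = PySem.List.dedup (l.map (·.1)) := by
  show (List.foldl (fun d it => d.insert it.1 ((d.getD it.1 PySem.Dict.empty).insert it.2.1 it.2.2)) PySem.Dict.empty l).keys = _
  rw [PySem.Dict.keys_foldl_insert_key l (·.1)
    (fun d it => (d.getD it.1 PySem.Dict.empty).insert it.2.1 it.2.2) PySem.Dict.empty]
  rw [PySem.List.dedup_eq_ofList, PySem.Set.ofList_eq_foldl]
  simp [PySem.Set.update, PySem.Dict.keys_empty]

lemma pvNodupKeys (l : List (String × String × String)) :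
    (l.foldl pvStep PySem.Dict.empty).keys.Nodup := by
  show (List.foldl (fun d it => d.insert it.1 ((d.getD it.1 PySem.Dict.empty).insert it.2.1 it.2.2)) PySem.Dict.empty l).keys.Nodup
  exact PySem.Dict.nodup_keys_foldl_insert_key l (·.1)
    (fun d it => (d.getD it.1 PySem.Dict.empty).insert it.2.1 it.2.2) PySem.Dict.empty
    (by simp [PySem.Dict.keys_empty])

lemma pvGetD (l : List (String × String × String)) (d : PySem.Dict String (PySem.Dict String String)) (k : String) :
    (l.foldl pvStep d).getD k PySem.Dict.empty =
      (l.filter (fun it => it.1 == k)).foldl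
        (fun (dd : PySem.Dict String String) it => dd.insert it.2.1 it.2.2)
        (d.getD k PySem.Dict.empty) := by
  induction l generalizing d with
  | nil => rfl
  | cons it l ih =>
    simp only [List.foldl_cons, List.filter_cons]
    by_cases h : it.1 = k
    · subst h
      simp only [BEq.rfl, if_true, List.foldl_cons]
      rw [ih, pvStep, PySem.Dict.getD_insert_self]
    · have hb : (it.1 == k) = false := by simp [h]
      simp only [hb, Bool.false_eq_true, if_false]
      rw [ih, pvStep, PySem.Dict.getD_insert_of_ne d _ _ (Ne.symm h)]

-- ===== VERDICT (by name: the statement is the Claim_ definition above) =====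
theorem group_defs_by_type_py_spec : Claim_equal_group_defs_by_type_py := by
  intro xs _
  unfold Spec_group_defs_by_type_py group_defs_by_type_py group_defs_by_type_py_alt
  show (List.foldl pvStepAraw PySem.Dict.empty xs).items.map (fun q => (q.1, q.2.items)) = _
  rw [pvFoldA_eq]
  have hb : (List.foldl (fun acc (p : String × String × String × String) =>
      if PySem.Str.isIn "/" p.1 then
        match PySem.Str.splitMax? p.1 "/" 1 with
        | some (def_type :: field_part :: _) => acc ++ [(def_type, field_part, p.2.1)]
        | some [_] => acc
        | some [] => acc
        | none => acc
      else acc) ([] : List (String × String × String)) xs) = xs.filterMap pvParse1 := by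
    show List.foldl pvStepBraw ([] : List (String × String × String)) xs = _
    rw [pvFoldB_eq]; simp
  rw [hb]
  set l := xs.filterMap pvParse1 with hl
  rw [PySem.Dict.items_eq_map_keys (l.foldl pvStep PySem.Dict.empty) (pvNodupKeys l) PySem.Dict.empty,
    List.map_map, pvKeys l]
  refine List.map_congr_left ?_
  intro k _
  simp only [Function.comp]
  rw [pvGetD l PySem.Dict.empty k, PySem.Dict.getD_empty]
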